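-- pv_equiv track=rewrite | github.com/peggylo/drum-narrator | code/main.py | position_to_syllable
-- ===== SOURCE A (Python) =====
-- INSTRUMENT_TO_SYLLABLE = {
--     "kick": "懂",
--     "snare": "搭",
--     "hihat": "刺",
--     "crash": "框",
--     "tom1": "Tom1",
--     "tom2": "Tom2",
--     "tom3": "Tom3",
-- }
--
-- def position_to_syllable(instruments: list[str]) -> str:
--     """將單一位置的樂器轉成口訣"""
--     if not instruments:
--         return ""
--
--     # 按固定順序：crash > kick > snare > hihat > tom
--     syllables = []
--     for inst in ["crash", "kick", "snare", "hihat", "tom1", "tom2", "tom3"]: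
--         if inst in instruments:
--             syllables.append(INSTRUMENT_TO_SYLLABLE[inst])
--
--     return "".join(syllables)
-- ===== SOURCE B (Python) =====
-- INSTRUMENT_TO_SYLLABLE = {
--     "kick": "懂",
--     "snare": "搭",
--     "hihat": "刺",
--     "crash": "框",
--     "tom1": "Tom1",
--     "tom2": "Tom2",
--     "tom3": "Tom3",
-- }
--
-- _RANK = {name: i for i, name in enumerate(
--     ["crash", "kick", "snare", "hihat", "tom1", "tom2", "tom3"])}
--
-- def position_to_syllable(instruments: list[str]) -> str:
--     """將單一位置的樂器轉成口訣"""
--     present = {inst for inst in instruments if inst in _RANK}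
--     return "".join(INSTRUMENT_TO_SYLLABLE[name]
--                    for name in sorted(present, key=_RANK.__getitem__))
-- ===== Notes on version B (the rewrite author's own statement) =====
-- stated objective: alternative
-- what changed: A scans the fixed canonical order testing membership in the input; B filters and deduplicates the input against a rank table, sorts the survivors by rank, and joins their syllables.
import Mathlib
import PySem

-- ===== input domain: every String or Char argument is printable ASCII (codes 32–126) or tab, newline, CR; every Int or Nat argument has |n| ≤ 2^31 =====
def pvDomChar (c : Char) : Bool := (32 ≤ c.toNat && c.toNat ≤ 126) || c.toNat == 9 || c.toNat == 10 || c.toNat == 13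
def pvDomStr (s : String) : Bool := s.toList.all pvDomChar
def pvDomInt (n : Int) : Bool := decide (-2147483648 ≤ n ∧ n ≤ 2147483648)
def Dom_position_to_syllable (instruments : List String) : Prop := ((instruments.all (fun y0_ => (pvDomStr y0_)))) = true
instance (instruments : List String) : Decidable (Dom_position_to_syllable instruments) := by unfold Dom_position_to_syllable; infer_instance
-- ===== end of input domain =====

-- B replaces A's membership scan over the canonical order by filtering/deduplicating the
-- input and sorting the survivors by a rank table (objective: alternative decomposition).

-- ===== PORT A =====
def pvTable : PySem.Dict String String :=
  (((((((PySem.Dict.empty.insert "kick" "懂").insert "snare" "搭").insert "hihat" "刺").insert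
      "crash" "框").insert "tom1" "Tom1").insert "tom2" "Tom2").insert "tom3" "Tom3")

def position_to_syllable (instruments : List String) : String :=
  if instruments = [] then ""
  else
    let syllables := ["crash", "kick", "snare", "hihat", "tom1", "tom2", "tom3"].foldl
      (fun acc inst => if instruments.contains inst then acc ++ [pvTable.getD inst ""] else acc) []
    PySem.Str.join "" syllables

-- ===== PORT B =====
def pvCanonical : List String := ["crash", "kick", "snare", "hihat", "tom1", "tom2", "tom3"]

def pvRank : PySem.Dict String Int :=
  (PySem.List.enumerate pvCanonical).foldl (fun d p => d.insert p.2 p.1) PySem.Dict.empty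

def position_to_syllable_alt (instruments : List String) : String :=
  let present : PySem.Set String :=
    PySem.Set.ofList (instruments.filter (fun inst => (pvRank.get? inst).isSome))
  PySem.Str.join ""
    ((PySem.List.sorted present (fun name => pvRank.getD name 0)).map
      (fun name => pvTable.getD name ""))

-- ===== PRECONDITION & SPEC =====
def Spec_position_to_syllable (instruments : List String) (out : String) : Prop := out = position_to_syllable_alt instruments
instance (instruments : List String) (out : String) : Decidable (Spec_position_to_syllable instruments out) := by unfold Spec_position_to_syllable; infer_instance

-- ===== CLAIM (what is proved, stated in full; the proofs are below) =====
def Claim_equal_position_to_syllable : Prop := ∀ (instruments : List String), Dom_position_to_syllable instruments → Spec_position_to_syllable instruments (position_to_syllable instruments)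

-- ===== LEMMAS AND PROOFS =====

theorem canon_pairwise :
    List.Pairwise (fun a b => pvRank.getD a 0 < pvRank.getD b 0) pvCanonical := by decide

-- a string has a rank iff it is one of the seven canonical names
theorem rank_isSome_iff (x : String) : (pvRank.get? x).isSome = true ↔ x ∈ pvCanonical := by
  simp [pvRank, pvCanonical, PySem.List.enumerate, PySem.Dict.get?, PySem.Dict.insert,
    PySem.Dict.empty, List.foldl]
  tauto

theorem sorted_present_eq (instruments : List String) :
    PySem.List.sorted
      (PySem.Set.ofList (instruments.filter (fun inst => (pvRank.get? inst).isSome)))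
      (fun name => pvRank.getD name 0)
    = pvCanonical.filter (fun n => instruments.contains n) := by
  apply PySem.List.sorted_eq_of_perm_of_pairwise_lt
  · rw [List.perm_ext_iff_of_nodup
      (List.Nodup.filter _ (by decide)) (PySem.Set.nodup_ofList _)]
    intro a
    simp only [List.mem_filter, PySem.Set.mem_ofList]
    constructor
    · rintro ⟨hc, hi⟩
      exact ⟨by simpa using hi, by simpa [rank_isSome_iff] using hc⟩
    · rintro ⟨hi, hr⟩
      exact ⟨by simpa [rank_isSome_iff] using hr, by simpa using hi⟩
  · exact List.Pairwise.sublist List.filter_sublist canon_pairwise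

theorem foldl_filter_map (instruments : List String) :
    ∀ (xs : List String) (acc : List String),
      xs.foldl (fun acc inst =>
        if instruments.contains inst then acc ++ [pvTable.getD inst ""] else acc) acc
      = acc ++ (xs.filter (fun n => instruments.contains n)).map (fun n => pvTable.getD n "") := by
  intro xs
  induction xs with
  | nil => simp
  | cons x xs ih =>
    intro acc
    rw [List.foldl_cons, List.filter_cons]
    by_cases h : instruments.contains x = true
    · rw [if_pos h, if_pos h, ih, List.map_cons]; simp
    · rw [if_neg h, if_neg h, ih]

-- ===== VERDICT (by name: the statement is the Claim_ definition above) =====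
theorem position_to_syllable_spec : Claim_equal_position_to_syllable := by
  intro instruments _
  unfold Spec_position_to_syllable position_to_syllable position_to_syllable_alt
  dsimp only
  rw [sorted_present_eq]
  by_cases h : instruments = []
  · subst h; decide
  · rw [if_neg h]
    rw [show (["crash", "kick", "snare", "hihat", "tom1", "tom2", "tom3"] : List String)
        = pvCanonical from rfl,
      foldl_filter_map instruments pvCanonical []]
    simp
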